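-- pv_equiv track=rewrite | github.com/ahmedahmedov/Table2Vec | tokenizer_utilities.py | remove_invalid_chars
-- ===== SOURCE A (Python) =====
-- def remove_invalid_chars(str):
-- 	blacklist_chars = '!\"#$%&\'()*+,-./:;<=>?@[\\]^_`{|}~\t\n\r–’≥®²‘“”°'
-- 	str_list = []
-- 	for char in str:
-- 		if char not in blacklist_chars:
-- 			str_list.append(char)
-- 		else: ##BUG BUG : new change
-- 			str_list.append(' ')
--
-- 	return ''.join(str_list)
-- ===== SOURCE B (Python) =====
-- def remove_invalid_chars(str):
-- 	# Staged rewriting: one whole-string replace pass per blacklisted character.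
-- 	# Correct because the replacement space is itself never blacklisted, so the
-- 	# passes are independent and their order does not matter.
-- 	for c in '!\"#$%&\'()*+,-./:;<=>?@[\\]^_`{|}~\t\n\r–’≥®²‘“”°':
-- 		str = str.replace(c, ' ')
-- 	return str
-- ===== Notes on version B (the rewrite author's own statement) =====
-- stated objective: alternative
-- what changed: Replaced A's single pass with a per-character membership test and if/else branch by 44 staged whole-string str.replace passes, one per blacklisted character, with no membership test or branch; correct since the replacement space is never blacklisted so the passes are independent.
import Mathlib
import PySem

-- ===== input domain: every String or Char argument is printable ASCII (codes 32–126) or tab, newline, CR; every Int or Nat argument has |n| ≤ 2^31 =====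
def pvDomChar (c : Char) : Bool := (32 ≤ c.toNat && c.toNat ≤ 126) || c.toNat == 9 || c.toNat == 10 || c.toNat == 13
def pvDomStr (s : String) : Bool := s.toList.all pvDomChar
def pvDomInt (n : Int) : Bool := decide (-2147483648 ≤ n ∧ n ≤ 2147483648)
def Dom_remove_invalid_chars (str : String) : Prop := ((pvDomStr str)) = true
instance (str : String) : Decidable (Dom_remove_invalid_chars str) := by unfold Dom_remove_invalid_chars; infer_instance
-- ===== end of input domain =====

-- B replaces A's single pass with per-character membership test and branch by staged
-- whole-string replace passes, one per blacklisted character (alternative decomposition).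

-- ===== PORT A =====
-- blacklist_chars of A
def pvBlacklistA : List Char :=
  "!\"#$%&'()*+,-./:;<=>?@[\\]^_`{|}~\t\n\r–’≥®²‘“”°".toList

def remove_invalid_chars (str : String) : String :=
  -- for char in str: append char if not blacklisted else ' '; then ''.join
  String.ofList (str.toList.foldl
    (fun str_list char =>
      if pvBlacklistA.contains char = false then str_list ++ [char]
      else str_list ++ [' ']) [])

-- ===== PORT B =====
def remove_invalid_chars_alt (str : String) : String :=
  -- for c in blacklist: str = str.replace(c, ' '); return str
  ("!\"#$%&'()*+,-./:;<=>?@[\\]^_`{|}~\t\n\r–’≥®²‘“”°".toList).foldl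
    (fun s c => PySem.Str.replace s (String.ofList [c]) " ") str

-- ===== PRECONDITION & SPEC =====
def Spec_remove_invalid_chars (str : String) (out : String) : Prop := out = remove_invalid_chars_alt str
instance (str : String) (out : String) : Decidable (Spec_remove_invalid_chars str out) := by unfold Spec_remove_invalid_chars; infer_instance

-- ===== CLAIM =====
def Claim_equal_remove_invalid_chars : Prop := ∀ (str : String), Dom_remove_invalid_chars str → Spec_remove_invalid_chars str (remove_invalid_chars str)

-- ===== LEMMAS AND PROOFS =====

-- replace.go with a single-char pattern is a map, given enough fuel
theorem replace_go_single (c r : Char) :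
    ∀ (fuel : Nat) (l acc : List Char), l.length ≤ fuel →
      PySem.Chars.replace.go [c] [r] fuel l acc
        = acc.reverse ++ l.map (fun x => if x = c then r else x) := by
  intro fuel
  induction fuel with
  | zero =>
    intro l acc h
    have : l = [] := List.eq_nil_of_length_eq_zero (Nat.le_zero.mp h)
    subst this
    simp [PySem.Chars.replace.go]
  | succ n ih =>
    intro l acc h
    cases l with
    | nil => simp [PySem.Chars.replace.go]
    | cons x t =>
      rw [PySem.Chars.replace.go]
      by_cases hx : x = c
      · subst hx
        have hp : [x].isPrefixOf (x :: t) = true := by simp [List.isPrefixOf]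
        simp only [hp, if_true]
        rw [show List.drop [x].length (x :: t) = t from rfl,
            show [r].reverse ++ acc = r :: acc from rfl,
            ih t _ (by simpa using Nat.lt_succ_iff.mp (by simpa using h))]
        simp
      · have hp : [c].isPrefixOf (x :: t) = false := by
          simp only [List.isPrefixOf, Bool.and_eq_false_iff]
          left; simp [beq_eq_false_iff_ne]; intro h'; exact hx h'.symm
        simp only [hp, Bool.false_eq_true, if_false]
        rw [ih t _ (by simpa using Nat.lt_succ_iff.mp (by simpa using h))]
        simp [hx]

theorem replace_single (c r : Char) (l : List Char) :
    PySem.Chars.replace l [c] [r] = l.map (fun x => if x = c then r else x) := by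
  rw [PySem.Chars.replace, if_neg (by simp)]
  exact replace_go_single c r l.length l [] (le_refl _)

-- folding staged single-char-to-v maps over a blacklist is one map by membership,
-- provided v itself is not in the blacklist
theorem foldl_map_stages (v : Char) :
    ∀ (bl : List Char), bl.contains v = false →
      ∀ (l : List Char),
        bl.foldl (fun s c => s.map (fun x => if x = c then v else x)) l
          = l.map (fun x => if bl.contains x then v else x) := by
  intro bl
  induction bl with
  | nil => intro _ l; simp
  | cons c rest ih =>
    intro hv l
    have hvrest : rest.contains v = false := by
      cases hr : rest.contains v
      · rfl
      · exfalso; simp at hv; exact hv.2 (by simpa using hr)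
    have hvc : ¬ v = c := by
      intro h; subst h; simp at hv
    simp only [List.foldl_cons]
    rw [ih hvrest, List.map_map]
    apply List.map_congr_left
    intro x _
    by_cases hx : x = c
    · subst hx
      simp
    · simp [Function.comp, hx]

-- ===== VERDICT =====
theorem remove_invalid_chars_spec : Claim_equal_remove_invalid_chars := by
  intro str _
  unfold Spec_remove_invalid_chars remove_invalid_chars remove_invalid_chars_alt
  apply String.toList_inj.mp
  -- B side: each staged Str.replace pass is a map on toList
  have hstep : ∀ (s : String) (c : Char),
      (PySem.Str.replace s (String.ofList [c]) " ").toList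
        = s.toList.map (fun x => if x = c then ' ' else x) := by
    intro s c
    rw [PySem.Str.toList_replace]
    simpa using replace_single c ' ' s.toList
  have hB : ∀ (bl : List Char) (s : String),
      (bl.foldl (fun s c => PySem.Str.replace s (String.ofList [c]) " ") s).toList
        = bl.foldl (fun t c => t.map (fun x => if x = c then ' ' else x)) s.toList := by
    intro bl
    induction bl with
    | nil => intro s; rfl
    | cons c rest ih =>
      intro s
      simp only [List.foldl_cons]
      rw [ih, hstep]
  rw [hB,
      show ("!\"#$%&'()*+,-./:;<=>?@[\\]^_`{|}~\t\n\r–’≥®²‘“”°".toList) = pvBlacklistA from rfl,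
      foldl_map_stages ' ' pvBlacklistA (by decide), String.toList_ofList]
  -- A side: foldl-append is a map
  have hA : ∀ (l : List Char),
      l.foldl (fun str_list char =>
        if pvBlacklistA.contains char = false then str_list ++ [char]
        else str_list ++ [' ']) []
      = l.map (fun x => if pvBlacklistA.contains x then ' ' else x) := by
    intro l
    have h1 : ∀ (acc : List Char) (char : Char),
        (if pvBlacklistA.contains char = false then acc ++ [char] else acc ++ [' '])
        = acc ++ [if pvBlacklistA.contains char then ' ' else char] := by
      intro acc char
      by_cases h : char ∈ pvBlacklistA <;> simp [h]
    calc l.foldl (fun str_list char =>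
          if pvBlacklistA.contains char = false then str_list ++ [char]
          else str_list ++ [' ']) []
        = l.foldl (fun acc char => acc ++ [if pvBlacklistA.contains char then ' ' else char]) [] := by
          congr 1; funext acc char; exact h1 acc char
      _ = l.map (fun x => if pvBlacklistA.contains x then ' ' else x) := by
          simpa using PySem.List.foldl_append_singleton_eq_map
            (fun x => if pvBlacklistA.contains x then ' ' else x) l []
  rw [hA]
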